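-- pv_equiv track=rewrite | github.com/openscm/pymagicc | pymagicc/io.py | find_parameter_groups
-- ===== SOURCE A (Python) =====
-- def find_parameter_groups(columns):
--     """
--     Find parameter groups within a list
--
--     This finds all the parameters which should be grouped together into tuples rather
--     than being separated. For example, if you have a list like
--     ``["CORE_CLIMATESENSITIVITY", "RF_BBAER_DIR_WM2", "OUT_ZERO_TEMP_PERIOD_1", "OUT_ZERO_TEMP_PERIOD_2"]``,
--     this function will return
--     ``{"OUT_ZERO_TEMP_PERIOD": ["OUT_ZERO_TEMP_PERIOD_1", "OUT_ZERO_TEMP_PERIOD_2"]}``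
--     which tells you that the parameters
--     ``["OUT_ZERO_TEMP_PERIOD_1", "OUT_ZERO_TEMP_PERIOD_2"]`` should be grouped
--     together into a tuple with the name ``"OUT_ZERO_TEMP_PERIOD"`` while all the other
--     columns don't belong to any group.
--
--     Parameters
--     ----------
--     list of str
--         List of strings to sort
--
--     Returns
--     -------
--     dict of str: list of str
--         Dictionary where the keys are the 'group names' and the values are the list of
--         parameters which belong to that group name.
--     """
--     cols_to_merge = {}
--     for c in columns:
--         toks = c.split("_")
--         start = "_".join(toks[:-1])
--         if start.lower() in ["file_emisscen", "out_keydata", "file_tuningmodel"]: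
--             continue
--
--         try:
--             int(toks[-1])  # Check if the last token is an integer
--             if start not in cols_to_merge:
--                 cols_to_merge[start] = []
--             cols_to_merge[start].append(c)
--         except (ValueError, TypeError):
--             continue
--
--     return {k: sorted(v) for k, v in cols_to_merge.items()}
-- ===== SOURCE B (Python) =====
-- def find_parameter_groups(columns):
--     blocked = {"file_emisscen", "out_keydata", "file_tuningmodel"}
--
--     def prefix(c):
--         return "_".join(c.split("_")[:-1])
--
--     def eligible(c):
--         toks = c.split("_")
--         start = "_".join(toks[:-1])
--         if start.lower() in blocked:
--             return False
--         try:
--             int(toks[-1])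
--             return True
--         except (ValueError, TypeError):
--             return False
--
--     elig = [c for c in columns if eligible(c)]
--     keys = list(dict.fromkeys(prefix(c) for c in elig))
--     elig_sorted = sorted(elig)
--     return {k: [c for c in elig_sorted if prefix(c) == k] for k in keys}
-- ===== Notes on version B (the rewrite author's own statement) =====
-- stated objective: alternative
-- what changed: Instead of A's dict-of-lists built in one loop with a per-group sorted() at the end, B pre-filters the eligible columns, deduplicates their prefixes for the key order, sorts the eligible list once globally, and builds each group by filtering that one sorted list, so no per-group sort exists.
import Mathlib
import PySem

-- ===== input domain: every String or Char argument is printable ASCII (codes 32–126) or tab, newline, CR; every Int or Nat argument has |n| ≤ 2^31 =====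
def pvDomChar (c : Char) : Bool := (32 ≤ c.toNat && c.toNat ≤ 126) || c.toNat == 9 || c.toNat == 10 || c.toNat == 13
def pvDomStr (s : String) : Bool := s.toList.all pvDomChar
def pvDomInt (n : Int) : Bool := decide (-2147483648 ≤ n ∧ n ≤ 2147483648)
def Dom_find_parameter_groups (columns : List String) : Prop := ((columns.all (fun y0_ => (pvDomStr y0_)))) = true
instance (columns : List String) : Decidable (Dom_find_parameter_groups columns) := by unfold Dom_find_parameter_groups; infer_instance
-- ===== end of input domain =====

-- B replaces A's per-group sorted() with one global sort of the pre-filtered eligible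
-- columns plus a groupby-style pass per first-occurrence prefix (objective: alternative).

-- ===== PORT A =====
-- A's loop: dict of lists keyed by the prefix, appended to per column, then each value sorted.
-- toks[-1]: split? "_" is always some (sep ≠ "") and yields a nonempty list, so .getD is never hit.
def find_parameter_groups (columns : List String) : List (String × List String) :=
  let d := columns.foldl (fun d c =>
    let toks := (PySem.Str.split? c "_").getD []
    let start := PySem.Str.join "_" (PySem.List.slice toks none (some (-1)))
    if ["file_emisscen", "out_keydata", "file_tuningmodel"].contains (PySem.Str.lower start) then d
    else
      match PySem.Int.ofStr? ((PySem.List.pyGet? toks (-1)).getD "") with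
      | some _ => d.modify start [] (fun v => v ++ [c])
      | none => d) PySem.Dict.empty
  d.items.map (fun p => (p.1, PySem.List.sorted p.2 (fun x => x) false))

-- ===== PORT B =====
def pvPrefix (c : String) : String :=
  PySem.Str.join "_" (PySem.List.slice ((PySem.Str.split? c "_").getD []) none (some (-1)))

def pvEligible (c : String) : Bool :=
  let toks := (PySem.Str.split? c "_").getD []
  let start := PySem.Str.join "_" (PySem.List.slice toks none (some (-1)))
  if ["file_emisscen", "out_keydata", "file_tuningmodel"].contains (PySem.Str.lower start) then false
  else (PySem.Int.ofStr? ((PySem.List.pyGet? toks (-1)).getD "")).isSome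

def find_parameter_groups_alt (columns : List String) : List (String × List String) :=
  let elig := columns.filter pvEligible
  let keys := PySem.List.dedup (elig.map pvPrefix)
  let eligSorted := PySem.List.sorted elig (fun x => x) false
  keys.map (fun k => (k, eligSorted.filter (fun c => pvPrefix c == k)))

-- ===== PRECONDITION & SPEC =====
def Spec_find_parameter_groups (columns : List String) (out : List (String × List String)) : Prop := out = find_parameter_groups_alt columns
instance (columns : List String) (out : List (String × List String)) : Decidable (Spec_find_parameter_groups columns out) := by unfold Spec_find_parameter_groups; infer_instance

-- ===== CLAIM (what is proved, stated in full; the proofs are below) =====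
def Claim_equal_find_parameter_groups : Prop := ∀ (columns : List String), Dom_find_parameter_groups columns → Spec_find_parameter_groups columns (find_parameter_groups columns)

-- ===== LEMMAS AND PROOFS =====

-- A's loop body, rewritten through B's eligibility test and prefix function.
lemma stepA_eq (d : PySem.Dict String (List String)) (c : String) :
    (let toks := (PySem.Str.split? c "_").getD []
     let start := PySem.Str.join "_" (PySem.List.slice toks none (some (-1)))
     if ["file_emisscen", "out_keydata", "file_tuningmodel"].contains (PySem.Str.lower start) then d
     else
       match PySem.Int.ofStr? ((PySem.List.pyGet? toks (-1)).getD "") with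
       | some _ => d.modify start [] (fun v => v ++ [c])
       | none => d)
    = if pvEligible c then d.modify (pvPrefix c) [] (fun v => v ++ [c]) else d := by
  cases hk : PySem.Int.ofStr? ((PySem.List.pyGet? ((PySem.Str.split? c "_").getD []) (-1)).getD "") with
  | none => simp [pvEligible, hk]
  | some v =>
    simp only [pvEligible, pvPrefix, hk]
    split_ifs <;> simp_all

-- filtering commutes with Python's sorted (identity key): both sides are the unique
-- ≤-sorted permutation of the filtered list.
lemma sorted_filter_comm (l : List String) (p : String → Bool) :
    PySem.List.sorted (l.filter p) (fun x => x) false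
      = (PySem.List.sorted l (fun x => x) false).filter p := by
  refine PySem.List.eq_of_perm_of_pairwise_le_of_injective (fun x : String => x)
    (fun a b h => h) ?_ ?_ ?_
  · exact (PySem.List.sorted_perm _ _ _).trans ((PySem.List.sorted_perm l _ _).filter p).symm
  · exact PySem.List.sorted_pairwise _ _
  · exact (PySem.List.sorted_pairwise l _).filter _

-- ===== VERDICT (by name: the statement is the Claim_ definition above) =====
theorem find_parameter_groups_spec : Claim_equal_find_parameter_groups := by
  intro columns _
  unfold Spec_find_parameter_groups find_parameter_groups find_parameter_groups_alt
  simp only [stepA_eq]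
  rw [PySem.List.foldl_if_eq_foldl_filter]
  have hnd : (List.foldl (fun d c => d.modify (pvPrefix c) [] fun v => v ++ [c])
      PySem.Dict.empty (columns.filter pvEligible)).keys.Nodup :=
    PySem.Dict.nodup_keys_foldl_modify_key _ pvPrefix [] (fun _ c v => v ++ [c]) _ (by simp)
  rw [PySem.Dict.items_eq_map_keys _ hnd [], PySem.Dict.keys_foldl_modify_key, List.map_map]
  have hkeys : PySem.Set.update (PySem.Dict.empty (κ := String) (ν := List String)).keys
      ((columns.filter pvEligible).map pvPrefix)
      = PySem.List.dedup ((columns.filter pvEligible).map pvPrefix) := rfl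
  rw [hkeys]
  refine List.map_congr_left (fun k hk => ?_)
  have hget := PySem.Dict.getD_foldl_modify_append
    ((columns.filter pvEligible).map (fun c => (pvPrefix c, c))) PySem.Dict.empty k
  rw [List.foldl_map] at hget
  simp only [List.filter_map, List.map_map] at hget
  simp only [Function.comp_apply, hget]
  simp [sorted_filter_comm, Function.comp_def]
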